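-- pv_equiv track=rewrite | github.com/Rubalchoudhary21/Elevate_Labs_Project | password_tool.py | generate_wordlist
-- ===== SOURCE A (Python) =====
-- import itertools
--
-- LEET_MAP = {
--     'a': ['a', '@', '4'],
--     'e': ['e', '3'],
--     'i': ['i', '1', '!'],
--     'o': ['o', '0'],
--     's': ['s', '$', '5'],
--     't': ['t', '7'],
-- }
--
-- def leet_variants(word):
--     pools = [LEET_MAP.get(c.lower(), [c]) for c in word]
--     return set(''.join(combo) for combo in itertools.product(*pools))
--
-- def generate_wordlist(inputs, append_years=True):
--     base_words = set()
--     for i in inputs: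
--         base_words.update(leet_variants(i))
--
--     combinations = set(base_words)
--
--     # Common patterns to append/prepend
--     special_patterns = ["!", "@", "#", "123", "_", "1", "12", "!@#", "321"]
--
--     # Append years
--     if append_years:
--         for bw in base_words:
--             for y in range(1990, 2025):
--                 combinations.add(f"{bw}{y}")
--
--     # Append/prepend special characters and digits
--     extended = set()
--     for bw in base_words:
--         for p in special_patterns:
--             extended.add(f"{bw}{p}")
--             extended.add(f"{p}{bw}")
--
--     combinations.update(extended)
--
--     return sorted(combinations)
-- ===== SOURCE B (Python) =====
-- LEET_MAP = {
--     'a': ['a', '@', '4'],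
--     'e': ['e', '3'],
--     'i': ['i', '1', '!'],
--     'o': ['o', '0'],
--     's': ['s', '$', '5'],
--     't': ['t', '7'],
-- }
--
-- SPECIAL_PATTERNS = ["!", "@", "#", "123", "_", "1", "12", "!@#", "321"]
--
-- def _variants(word):
--     # recursion on the word: all leet spellings of word
--     if not word:
--         return ['']
--     tails = _variants(word[1:])
--     return [o + t for o in LEET_MAP.get(word[0].lower(), [word[0]]) for t in tails]
--
-- def generate_wordlist(inputs, append_years=True):
--     base = [v for w in inputs for v in _variants(w)]
--     # one decorator table: (prefix, suffix) pairs, identity included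
--     decorators = [('', '')]
--     if append_years:
--         decorators += [('', str(y)) for y in range(1990, 2025)]
--     decorators += [('', p) for p in SPECIAL_PATTERNS]
--     decorators += [(p, '') for p in SPECIAL_PATTERNS]
--     return sorted({pre + bw + suf for bw in base for pre, suf in decorators})
-- ===== Notes on version B (the rewrite author's own statement) =====
-- stated objective: simpler
-- what changed: B replaces itertools.product and the three staged set-building loops by a recursive per-word leet expansion (plain lists, no intermediate sets) and a single (prefix,suffix) decorator table that includes the identity, the years and the patterns, so the whole output is one comprehension over base x decorators deduplicated once at the end.
import Mathlib
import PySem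

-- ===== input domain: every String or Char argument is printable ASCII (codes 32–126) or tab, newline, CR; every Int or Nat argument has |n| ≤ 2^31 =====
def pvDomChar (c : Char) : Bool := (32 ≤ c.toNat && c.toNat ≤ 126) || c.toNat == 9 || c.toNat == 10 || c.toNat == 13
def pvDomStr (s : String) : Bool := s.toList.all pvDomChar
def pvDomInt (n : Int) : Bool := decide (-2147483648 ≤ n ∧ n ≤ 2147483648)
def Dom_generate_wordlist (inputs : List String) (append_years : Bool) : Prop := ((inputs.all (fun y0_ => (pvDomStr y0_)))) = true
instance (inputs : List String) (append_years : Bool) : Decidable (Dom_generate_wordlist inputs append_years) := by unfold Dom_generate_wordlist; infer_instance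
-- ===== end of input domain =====

-- B expands a word's leet spellings by recursion on the word (plain lists, no intermediate
-- sets) and replaces A's three staged set-building loops by one (prefix,suffix) decorator
-- table applied in a single comprehension, deduplicating once at the end; same results.

-- ===== PORT A =====
-- LEET_MAP: keys are the 1-char strings, modelled as List Char
def pvLeetMap : PySem.Dict (List Char) (List (List Char)) :=
  PySem.Dict.ofList
    [ (['a'], [['a'], ['@'], ['4']]),
      (['e'], [['e'], ['3']]),
      (['i'], [['i'], ['1'], ['!']]),
      (['o'], [['o'], ['0']]),
      (['s'], [['s'], ['$'], ['5']]),
      (['t'], [['t'], ['7']]) ]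

-- itertools.product(*pools): lexicographic tuples, head pool varying slowest
def pvProduct : List (List (List Char)) → List (List (List Char))
  | [] => [[]]
  | p :: ps => p.flatMap (fun x => (pvProduct ps).map (fun rest => x :: rest))

def leet_variants (word : List Char) : PySem.Set (List Char) :=
  let pools := word.map (fun c => pvLeetMap.getD (PySem.Chars.lower [c]) [[c]])
  PySem.Set.ofList ((pvProduct pools).map List.flatten)

def pvSpecialPatterns : List (List Char) :=
  [['!'], ['@'], ['#'], ['1','2','3'], ['_'], ['1'], ['1','2'], ['!','@','#'], ['3','2','1']]

def generate_wordlist (inputs : List String) (append_years : Bool) : List String :=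
  let base_words : PySem.Set (List Char) :=
    inputs.foldl (fun bw i => PySem.Set.update bw (leet_variants i.toList)) PySem.Set.empty
  let combinations : PySem.Set (List Char) := PySem.Set.ofList base_words
  let combinations :=
    if append_years then
      base_words.foldl (fun comb bw =>
        (PySem.List.pyRange 1990 2025 1).foldl
          (fun comb y => PySem.Set.add comb (bw ++ PySem.Int.toChars y)) comb) combinations
    else combinations
  let extended : PySem.Set (List Char) :=
    base_words.foldl (fun ext bw =>
      pvSpecialPatterns.foldl
        (fun ext p => PySem.Set.add (PySem.Set.add ext (bw ++ p)) (p ++ bw)) ext)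
      PySem.Set.empty
  let combinations := PySem.Set.update combinations extended
  (PySem.List.sorted combinations (fun x => x) false).map String.ofList

-- ===== PORT B =====
-- _variants: recursion on the word
def pvVariants : List Char → List (List Char)
  | [] => [[]]
  | c :: cs =>
    (pvLeetMap.getD (PySem.Chars.lower [c]) [[c]]).flatMap
      (fun o => (pvVariants cs).map (fun t => o ++ t))

-- the decorator table: identity, then years (if requested), then suffix and prefix patterns
def pvDecorators (append_years : Bool) : List (List Char × List Char) :=
  [([], [])]
  ++ (if append_years then
        (PySem.List.pyRange 1990 2025 1).map (fun y => (([] : List Char), PySem.Int.toChars y))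
      else [])
  ++ pvSpecialPatterns.map (fun p => (([] : List Char), p))
  ++ pvSpecialPatterns.map (fun p => (p, ([] : List Char)))

def generate_wordlist_alt (inputs : List String) (append_years : Bool) : List String :=
  let base : List (List Char) := inputs.flatMap (fun w => pvVariants w.toList)
  let out : PySem.Set (List Char) :=
    PySem.Set.ofList
      (base.flatMap (fun bw => (pvDecorators append_years).map (fun d => d.1 ++ bw ++ d.2)))
  (PySem.List.sorted out (fun x => x) false).map String.ofList

-- ===== PRECONDITION & SPEC =====
def Spec_generate_wordlist (inputs : List String) (append_years : Bool) (out : List String) : Prop := out = generate_wordlist_alt inputs append_years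
instance (inputs : List String) (append_years : Bool) (out : List String) : Decidable (Spec_generate_wordlist inputs append_years out) := by unfold Spec_generate_wordlist; infer_instance

-- ===== CLAIM (what is proved, stated in full; the proofs are below) =====
def Claim_equal_generate_wordlist : Prop := ∀ (inputs : List String) (append_years : Bool), Dom_generate_wordlist inputs append_years → Spec_generate_wordlist inputs append_years (generate_wordlist inputs append_years)

-- ===== LEMMAS AND PROOFS =====

-- named copies (definitionally equal) of the let-chains inside the two ports, for the proofs
def pvPJ (w : List Char) : List (List Char) :=
  (pvProduct (w.map (fun c => pvLeetMap.getD (PySem.Chars.lower [c]) [[c]]))).map List.flatten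

def pvBaseA (inputs : List String) : PySem.Set (List Char) :=
  inputs.foldl (fun bw i => PySem.Set.update bw (leet_variants i.toList)) PySem.Set.empty

def pvSetA (inputs : List String) (append_years : Bool) : PySem.Set (List Char) :=
  let base_words := pvBaseA inputs
  let combinations : PySem.Set (List Char) := PySem.Set.ofList base_words
  let combinations :=
    if append_years then
      base_words.foldl (fun comb bw =>
        (PySem.List.pyRange 1990 2025 1).foldl
          (fun comb y => PySem.Set.add comb (bw ++ PySem.Int.toChars y)) comb) combinations
    else combinations
  let extended : PySem.Set (List Char) :=
    base_words.foldl (fun ext bw =>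
      pvSpecialPatterns.foldl
        (fun ext p => PySem.Set.add (PySem.Set.add ext (bw ++ p)) (p ++ bw)) ext)
      PySem.Set.empty
  PySem.Set.update combinations extended

def pvSetB (inputs : List String) (append_years : Bool) : PySem.Set (List Char) :=
  PySem.Set.ofList
    ((inputs.flatMap (fun w => pvVariants w.toList)).flatMap
      (fun bw => (pvDecorators append_years).map (fun d => d.1 ++ bw ++ d.2)))

-- the common membership normal form of both final sets
def pvNormal (inputs : List String) (append_years : Bool) (x : List Char) : Prop :=
  (∃ w ∈ inputs, x ∈ pvPJ w.toList)
  ∨ (append_years = true ∧ ∃ bw, (∃ w ∈ inputs, bw ∈ pvPJ w.toList) ∧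
       ∃ y ∈ PySem.List.pyRange 1990 2025 1, x = bw ++ PySem.Int.toChars y)
  ∨ (∃ bw, (∃ w ∈ inputs, bw ∈ pvPJ w.toList) ∧
       ∃ p ∈ pvSpecialPatterns, (x = bw ++ p ∨ x = p ++ bw))

-- B's recursive expansion computes exactly A's joined product, as a list
lemma pvVariants_eq_pvPJ (w : List Char) : pvVariants w = pvPJ w := by
  induction w with
  | nil => rfl
  | cons c cs ih =>
    rw [pvVariants, ih]
    simp only [pvPJ, List.map_cons, pvProduct, List.map_flatMap, List.map_map]
    rfl

lemma mem_pvBaseA (inputs : List String) (x : List Char) :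
    x ∈ pvBaseA inputs ↔ ∃ w ∈ inputs, x ∈ pvPJ w.toList := by
  have key : ∀ s : PySem.Set (List Char),
      x ∈ inputs.foldl (fun bw i => PySem.Set.update bw (leet_variants i.toList)) s
      ↔ x ∈ s ∨ ∃ w ∈ inputs, x ∈ pvPJ w.toList := by
    induction inputs with
    | nil => simp
    | cons w ws ih =>
      intro s
      rw [List.foldl_cons, ih, PySem.Set.mem_update]
      show (x ∈ s ∨ x ∈ PySem.Set.ofList (pvPJ w.toList)) ∨ _ ↔ _
      rw [PySem.Set.mem_ofList]
      simp only [List.mem_cons]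
      constructor
      · rintro (⟨h | h⟩ | ⟨w', hw', hx⟩)
        · exact Or.inl h
        · exact Or.inr ⟨w, Or.inl rfl, h⟩
        · exact Or.inr ⟨w', Or.inr hw', hx⟩
      · rintro (h | ⟨w', hw' | hw', hx⟩)
        · exact Or.inl (Or.inl h)
        · exact Or.inl (Or.inr (by rwa [hw'] at hx))
        · exact Or.inr ⟨w', hw', hx⟩
  simpa [PySem.Set.empty] using key PySem.Set.empty

-- A's year loop membership
lemma mem_year_loop (base : List (List Char)) (s : PySem.Set (List Char)) (x : List Char) :
    x ∈ base.foldl (fun comb bw =>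
          (PySem.List.pyRange 1990 2025 1).foldl
            (fun comb y => PySem.Set.add comb (bw ++ PySem.Int.toChars y)) comb) s
    ↔ x ∈ s ∨ ∃ bw ∈ base, ∃ y ∈ PySem.List.pyRange 1990 2025 1, x = bw ++ PySem.Int.toChars y := by
  induction base generalizing s with
  | nil => simp
  | cons bw bws ih =>
    rw [List.foldl_cons, ih, PySem.Set.mem_foldl_add]
    simp only [List.mem_cons]
    constructor
    · rintro (⟨h | ⟨y, hy, rfl⟩⟩ | ⟨b, hb, hx⟩)
      · exact Or.inl h
      · exact Or.inr ⟨bw, Or.inl rfl, y, hy, rfl⟩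
      · exact Or.inr ⟨b, Or.inr hb, hx⟩
    · rintro (h | ⟨b, hb | hb, y, hy, hx⟩)
      · exact Or.inl (Or.inl h)
      · exact Or.inl (Or.inr ⟨y, hy, by rw [hx, hb]⟩)
      · exact Or.inr ⟨b, hb, y, hy, hx⟩

-- A's pattern loop membership
lemma mem_pat_loop (base : List (List Char)) (s : PySem.Set (List Char)) (x : List Char) :
    x ∈ base.foldl (fun ext bw =>
          pvSpecialPatterns.foldl
            (fun ext p => PySem.Set.add (PySem.Set.add ext (bw ++ p)) (p ++ bw)) ext) s
    ↔ x ∈ s ∨ ∃ bw ∈ base, ∃ p ∈ pvSpecialPatterns, (x = bw ++ p ∨ x = p ++ bw) := by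
  have inner : ∀ (P : List (List Char)) (bw : List Char) (s : PySem.Set (List Char)),
      x ∈ P.foldl (fun ext p => PySem.Set.add (PySem.Set.add ext (bw ++ p)) (p ++ bw)) s
      ↔ x ∈ s ∨ ∃ p ∈ P, (x = bw ++ p ∨ x = p ++ bw) := by
    intro P bw
    induction P with
    | nil => simp
    | cons p ps ihp =>
      intro s
      rw [List.foldl_cons, ihp]
      simp only [PySem.Set.mem_add, List.mem_cons]
      constructor
      · rintro (((h | h) | h) | ⟨q, hq, hx⟩)
        · exact Or.inl h
        · exact Or.inr ⟨p, Or.inl rfl, Or.inl h⟩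
        · exact Or.inr ⟨p, Or.inl rfl, Or.inr h⟩
        · exact Or.inr ⟨q, Or.inr hq, hx⟩
      · rintro (h | ⟨q, hq | hq, hx⟩)
        · exact Or.inl (Or.inl (Or.inl h))
        · subst hq
          rcases hx with h | h
          · exact Or.inl (Or.inl (Or.inr h))
          · exact Or.inl (Or.inr h)
        · exact Or.inr ⟨q, hq, hx⟩
  induction base generalizing s with
  | nil => simp
  | cons bw bws ih =>
    rw [List.foldl_cons]
    constructor
    · intro h
      rcases (ih _).mp h with h' | ⟨b, hb, hrest⟩
      · rcases (inner _ _ _).mp h' with h0 | ⟨p, hp, hx⟩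
        · exact Or.inl h0
        · exact Or.inr ⟨bw, List.mem_cons_self, p, hp, hx⟩
      · exact Or.inr ⟨b, List.mem_cons_of_mem _ hb, hrest⟩
    · rintro (h | ⟨b, hb, p, hp, hx⟩)
      · exact (ih _).mpr (Or.inl ((inner _ _ _).mpr (Or.inl h)))
      · rcases List.mem_cons.mp hb with rfl | hb
        · exact (ih _).mpr (Or.inl ((inner _ _ _).mpr (Or.inr ⟨p, hp, hx⟩)))
        · exact (ih _).mpr (Or.inr ⟨b, hb, p, hp, hx⟩)

-- the final set of port A, characterized
lemma mem_pvSetA (inputs : List String) (append_years : Bool) (x : List Char) :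
    x ∈ pvSetA inputs append_years ↔ pvNormal inputs append_years x := by
  rw [pvSetA]
  cases append_years with
  | false =>
    simp only [Bool.false_eq_true, if_false, PySem.Set.mem_update, mem_pat_loop,
      PySem.Set.mem_ofList, mem_pvBaseA, pvNormal, PySem.Set.empty, List.not_mem_nil,
      false_or, false_and]
  | true =>
    simp only [if_true, PySem.Set.mem_update, mem_year_loop, mem_pat_loop,
      PySem.Set.mem_ofList, mem_pvBaseA, pvNormal, PySem.Set.empty, List.not_mem_nil,
      false_or, true_and, or_assoc]

-- decorator-table membership, unfolded
lemma mem_pvDecorators (ay : Bool) (d : List Char × List Char) :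
    d ∈ pvDecorators ay ↔
      d = ([], []) ∨
      (ay = true ∧ ∃ y ∈ PySem.List.pyRange 1990 2025 1, d = ([], PySem.Int.toChars y)) ∨
      (∃ p ∈ pvSpecialPatterns, d = ([], p) ∨ d = (p, [])) := by
  cases ay <;> simp [pvDecorators, eq_comm] <;> aesop

-- the final set of port B, characterized
lemma mem_pvSetB (inputs : List String) (append_years : Bool) (x : List Char) :
    x ∈ pvSetB inputs append_years ↔ pvNormal inputs append_years x := by
  rw [pvSetB, PySem.Set.mem_ofList]
  simp only [List.mem_flatMap, List.mem_map, pvVariants_eq_pvPJ]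
  constructor
  · rintro ⟨bw, ⟨w, hw, hbw⟩, d, hd, rfl⟩
    rcases (mem_pvDecorators _ d).mp hd with rfl | ⟨hay, y, hy, rfl⟩ | ⟨p, hp, rfl | rfl⟩
    · exact Or.inl ⟨w, hw, by simpa using hbw⟩
    · exact Or.inr (Or.inl ⟨hay, bw, ⟨w, hw, hbw⟩, y, hy, by simp⟩)
    · exact Or.inr (Or.inr ⟨bw, ⟨w, hw, hbw⟩, p, hp, Or.inl (by simp)⟩)
    · exact Or.inr (Or.inr ⟨bw, ⟨w, hw, hbw⟩, p, hp, Or.inr (by simp)⟩)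
  · rintro (⟨w, hw, hx⟩ | ⟨hay, bw, hbw, y, hy, rfl⟩ | ⟨bw, hbw, p, hp, rfl | rfl⟩)
    · exact ⟨x, ⟨w, hw, hx⟩, ([], []), (mem_pvDecorators _ _).mpr (Or.inl rfl), by simp⟩
    · exact ⟨bw, hbw, ([], PySem.Int.toChars y),
        (mem_pvDecorators _ _).mpr (Or.inr (Or.inl ⟨hay, y, hy, rfl⟩)), by simp⟩
    · exact ⟨bw, hbw, ([], p),
        (mem_pvDecorators _ _).mpr (Or.inr (Or.inr ⟨p, hp, Or.inl rfl⟩)), by simp⟩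
    · exact ⟨bw, hbw, (p, []),
        (mem_pvDecorators _ _).mpr (Or.inr (Or.inr ⟨p, hp, Or.inr rfl⟩)), by simp⟩

-- a fold whose every step preserves Nodup preserves Nodup
lemma nodup_foldl_step {α β : Type} (step : List α → β → List α) (l : List β)
    (h : ∀ s a, s.Nodup → (step s a).Nodup) :
    ∀ s : List α, s.Nodup → (l.foldl step s).Nodup := by
  induction l with
  | nil => intro s hs; simpa using hs
  | cons b bs ih => intro s hs; rw [List.foldl_cons]; exact ih _ (h _ _ hs)

lemma nodup_pvSetA (inputs : List String) (append_years : Bool) :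
    (pvSetA inputs append_years).Nodup := by
  rw [pvSetA]
  apply PySem.Set.nodup_update
  · cases append_years with
  | false => exact PySem.Set.nodup_ofList _
  | true =>
    exact nodup_foldl_step _ _
      (fun s bw hs => nodup_foldl_step _ _ (fun s y hs => PySem.Set.nodup_add _ _ hs) _ hs)
      _ (PySem.Set.nodup_ofList _)

lemma nodup_pvSetB (inputs : List String) (append_years : Bool) :
    (pvSetB inputs append_years).Nodup := PySem.Set.nodup_ofList _

lemma sorted_inst_bridge (xs : List (List Char)) :
    @PySem.List.sorted (List Char) (List Char) List.instLT (fun a b => a.decidableLT b) xs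
      (fun x => x) false
    = @PySem.List.sorted (List Char) (List Char) List.instLinearOrder.toLT
        LinearOrder.toDecidableLT xs (fun x => x) false := by
  congr 1

lemma perm_pvSets (inputs : List String) (append_years : Bool) :
    (pvSetA inputs append_years).Perm (pvSetB inputs append_years) := by
  rw [List.perm_ext_iff_of_nodup (nodup_pvSetA inputs append_years) (nodup_pvSetB inputs append_years)]
  intro x
  rw [mem_pvSetA, mem_pvSetB]

-- ===== VERDICT (by name: the statement is the Claim_ definition above) =====
theorem generate_wordlist_spec : Claim_equal_generate_wordlist := by
  unfold Claim_equal_generate_wordlist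
  intro inputs append_years _
  unfold Spec_generate_wordlist
  have ha : generate_wordlist inputs append_years
      = (PySem.List.sorted (pvSetA inputs append_years) (fun x => x) false).map String.ofList := rfl
  have hb : generate_wordlist_alt inputs append_years
      = (PySem.List.sorted (pvSetB inputs append_years) (fun x => x) false).map String.ofList := rfl
  rw [ha, hb, sorted_inst_bridge, sorted_inst_bridge]
  congr 1
  exact PySem.List.sorted_eq_sorted_of_perm _ _ _ (fun a b h => h) (perm_pvSets inputs append_years)
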